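-- pv_equiv track=rewrite | github.com/panoskafantaris/Image-compression-AI | JPEG_COMPRESSION/EntropyEncoding.py | AC_RunLength_enc
-- ===== SOURCE A (Python) =====
-- import itertools
--
-- EOB = (0, 0) #end of block
--
-- ZRL = (15, 0) #zero length length
--
-- def AC_RunLength_enc(block):
--     #pairname to block to opoio omws  prwta exoume anatrexei me zig zag
--     #epita h metablhth group krata poses fores emfnisthke autos o arithmos px (63,0) dld to 0 emfanisthke 63 fores
--     #den einai 64 gt to prwto stoixeio panta einai to DC
--     groups = [(len(tuple(group)), key)
--               for key, group in itertools.groupby(block)]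
--
--     ret = []
--     helper = False  #tha th xrhsimopoihsoume gia ta zeugaria tou epomenou group pou to kleidi tous den einai mhden.
--
--     #epeidh h metablhth einai tuple kai mporoumee xwris na xeroume to mhkos ths listas na exetasoume
--     #to teleutaio stoixeio
--     if groups[-1][1] == 0:#an einai to 0 to teleutaio stoixeio oses fores kai na emfanizetai, sbhsto gt einai peritto
--         del groups[-1]
--     #gia ta upoloipa, to length edw xrhsimopoieitai gia na metrame ton arithmo twn stoixeiwn pou den exoun kwdikopoihthei akomh
--     for i, (length, key) in enumerate(groups):
--         if  helper== True:#an brethei tetoio zeugari pou to kleidi toy den einai to 0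
--             length -= 1
--             helper = False
--         if length == 0:#an to mhkos ginei 0 paei sto epomeno group
--             continue
--         if key == 0:#an o arithmos autos einai to 0
--             #an to mhkos einai megalutero apo 16 tote xrhsimopoieitai h kwdikopoish zrl
--             #exhgw toys logous sthn analush
--             while length >= 16:
--                 ret.append(ZRL)
--                 length -= 16
--             ret.append((length, groups[i + 1][1]))#an einai mikrotero apo 16 tha kwdikopoihthoume meta me tous non zero suntelestes AC
--             helper = True #sigoura to epomeno de tha einai 0 opote kai to thetoume true
--         else: #an den einai 0 tote thetoume mhkos 0 gt mas endiaferoun ta axrhsta mhdenika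
--             ret.extend(((0, key), ) * length)
--     return ret + [EOB] #prosthetoume sto telos to special sumbolo EOB(end of block)
-- ===== SOURCE B (Python) =====
-- EOB = (0, 0)
-- ZRL = (15, 0)
--
-- def AC_RunLength_enc(block):
--     # Single streaming pass with a running zero-count; trailing zeros are
--     # never flushed so they fold into the final EOB.
--     ret = []
--     run = 0
--     for v in block:
--         if v == 0:
--             run += 1
--         else:
--             while run >= 16:
--                 ret.append(ZRL)
--                 run -= 16
--             ret.append((run, v))
--             run = 0
--     return ret + [EOB]
-- ===== Notes on version B (the rewrite author's own statement) =====
-- stated objective: simpler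
-- what changed: Replaced the groupby-based two-phase scheme (build a (length,key) group list, delete a trailing zero group, then walk groups borrowing the next group's key via a helper flag) with one streaming pass that only maintains a running zero-count, flushed as ZRLs plus (run,value) when a nonzero coefficient arrives; trailing zeros are never flushed and fold into the final EOB.
-- crash fix: On the empty block A raises IndexError (groups[-1] on an empty group list) while B returns [(0, 0)] (just the EOB marker). — e.g. on AC_RunLength_enc([]): A raises IndexError, B returns [(0, 0)]
import Mathlib
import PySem

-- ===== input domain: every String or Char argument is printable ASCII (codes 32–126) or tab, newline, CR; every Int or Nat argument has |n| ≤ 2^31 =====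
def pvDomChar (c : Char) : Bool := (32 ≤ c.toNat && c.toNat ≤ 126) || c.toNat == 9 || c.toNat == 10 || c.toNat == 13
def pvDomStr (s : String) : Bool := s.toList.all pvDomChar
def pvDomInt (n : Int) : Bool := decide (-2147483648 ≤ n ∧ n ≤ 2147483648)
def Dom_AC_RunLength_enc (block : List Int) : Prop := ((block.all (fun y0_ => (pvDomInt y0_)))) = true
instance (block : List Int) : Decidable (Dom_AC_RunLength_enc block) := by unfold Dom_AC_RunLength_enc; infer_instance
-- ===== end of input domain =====

-- B replaces A's groupby + look-ahead-into-next-group scheme by one streaming pass that keeps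
-- only a running zero-count (objective: simpler). Return-value equivalence on nonempty blocks;
-- on [] A raises IndexError (excluded by Pre_) while B returns [(0,0)].

-- ===== PORT A =====
-- itertools.groupby(block) as a list of (run length, key) pairs, lengths as Python ints
def pyGroups : List Int → List (Int × Int)
  | [] => []
  | x :: xs =>
    (((xs.takeWhile (· == x)).length : Int) + 1, x) :: pyGroups (xs.dropWhile (· == x))
  termination_by l => l.length
  decreasing_by
    have := List.length_dropWhile_le (p := (· == x)) (l := xs)
    simp; omega

-- 'if groups[-1][1] == 0: del groups[-1]'; on an empty group list Python raises IndexError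
-- (excluded by Pre_), here the empty list is returned unchanged.
def trimA (g : List (Int × Int)) : List (Int × Int) :=
  if ((g.getLast?.map Prod.snd).getD 1) = 0 then g.dropLast else g

-- the 'while length >= 16: ret.append(ZRL); length -= 16' loop: emitted ZRLs and final length
def zloopA (len : Int) : List (Int × Int) × Int :=
  if len ≥ 16 then
    let p := zloopA (len - 16)
    ((15, 0) :: p.1, p.2)
  else ([], len)
  termination_by len.toNat
  decreasing_by omega

-- the 'for i, (length, key) in enumerate(groups)' loop; the 'if helper: length -= 1;
-- helper = False' step is unrolled into the two values of the helper flag (helper=true uses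
-- length-1, helper=false the length as stored), the rest of the body is identical.
-- 'groups[i + 1][1]' becomes the head of the remaining groups (rest.headD: within Pre_ a
-- zero-key group is never last, so the IndexError branch is unreachable).
def loopA : Bool → List (Int × Int) → List (Int × Int)
  | _, [] => []
  | false, (len, key) :: rest =>
    if len = 0 then loopA false rest
    else if key = 0 then
      ((zloopA len).1 ++ [((zloopA len).2, (rest.headD (0, 0)).2)]) ++ loopA true rest
    else
      List.replicate len.toNat (0, key) ++ loopA false rest
  | true, (len0, key) :: rest =>
    if len0 - 1 = 0 then loopA false rest
    else if key = 0 then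
      ((zloopA (len0 - 1)).1 ++ [((zloopA (len0 - 1)).2, (rest.headD (0, 0)).2)]) ++ loopA true rest
    else
      List.replicate (len0 - 1).toNat (0, key) ++ loopA false rest

def AC_RunLength_enc (block : List Int) : List (Int × Int) :=
  loopA false (trimA (pyGroups block)) ++ [(0, 0)]

-- ===== PORT B =====
-- the single streaming pass of Source B: run counts pending zeros, flushed on a nonzero value
def loopB (run : Int) : List Int → List (Int × Int)
  | [] => []
  | v :: vs =>
    if v = 0 then loopB (run + 1) vs
    else if run ≥ 16 then (15, 0) :: loopB (run - 16) (v :: vs)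
    else (run, v) :: loopB 0 vs
  termination_by vs => (vs.length, run.toNat)
  decreasing_by
  · apply Prod.Lex.left; simp only [List.length_cons]; omega
  · apply Prod.Lex.right; omega
  · apply Prod.Lex.left; simp only [List.length_cons]; omega

def AC_RunLength_enc_alt (block : List Int) : List (Int × Int) :=
  loopB 0 block ++ [(0, 0)]

-- ===== PRECONDITION & SPEC =====
-- Pre_ excludes only the empty block, on which Python A raises IndexError (groups[-1]).
def Pre_AC_RunLength_enc (block : List Int) : Prop := block ≠ []
instance (block : List Int) : Decidable (Pre_AC_RunLength_enc block) := by unfold Pre_AC_RunLength_enc; infer_instance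
def pvWitness_AC_RunLength_enc : List Int := [5, 0, 0, 1, 0]

-- On the empty block A raises IndexError while B returns just the EOB marker [(0,0)].
def Raises_AC_RunLength_enc (block : List Int) : Prop := block = []
instance (block : List Int) : Decidable (Raises_AC_RunLength_enc block) := by unfold Raises_AC_RunLength_enc; infer_instance
def pvRaiseWitness_AC_RunLength_enc : List Int := []
def pvRaiseWitnessOut_AC_RunLength_enc : List (Int × Int) := [(0, 0)]

def Spec_AC_RunLength_enc (block : List Int) (out : List (Int × Int)) : Prop := out = AC_RunLength_enc_alt block
instance (block : List Int) (out : List (Int × Int)) : Decidable (Spec_AC_RunLength_enc block out) := by unfold Spec_AC_RunLength_enc; infer_instance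

-- ===== CLAIM (what is proved, stated in full; the proofs are below) =====
def Claim_equal_AC_RunLength_enc : Prop := ∀ (block : List Int), Dom_AC_RunLength_enc block → Pre_AC_RunLength_enc block → Spec_AC_RunLength_enc block (AC_RunLength_enc block)
def Claim_raises_AC_RunLength_enc : Prop := (∀ (block : List Int), Dom_AC_RunLength_enc block → Raises_AC_RunLength_enc block → ¬ Pre_AC_RunLength_enc block) ∧ (Dom_AC_RunLength_enc (pvRaiseWitness_AC_RunLength_enc) ∧ Raises_AC_RunLength_enc (pvRaiseWitness_AC_RunLength_enc) ∧ AC_RunLength_enc_alt (pvRaiseWitness_AC_RunLength_enc) = pvRaiseWitnessOut_AC_RunLength_enc)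

-- ===== LEMMAS AND PROOFS =====

theorem pyGroups_nil : pyGroups [] = [] := by rw [pyGroups]

theorem pyGroups_cons (x : Int) (xs : List Int) :
    pyGroups (x :: xs) =
      (((xs.takeWhile (· == x)).length : Int) + 1, x) :: pyGroups (xs.dropWhile (· == x)) := by
  rw [pyGroups]

theorem loopA_nil (h : Bool) : loopA h [] = [] := by cases h <;> rfl

theorem loopB_nil (run : Int) : loopB run [] = [] := by rw [loopB]

theorem loopB_cons (run v : Int) (vs : List Int) :
    loopB run (v :: vs) =
      if v = 0 then loopB (run + 1) vs
      else if run ≥ 16 then (15, 0) :: loopB (run - 16) (v :: vs)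
      else (run, v) :: loopB 0 vs := by
  rw [loopB]

theorem loopB_zeros (n : Nat) (run : Int) (ys : List Int) :
    loopB run (List.replicate n 0 ++ ys) = loopB (run + n) ys := by
  induction n generalizing run with
  | zero => simp
  | succ m ih =>
    rw [List.replicate_succ, List.cons_append, loopB_cons, if_pos rfl, ih]
    congr 1; push_cast; ring

theorem zloopA_ge (len : Int) (h : len ≥ 16) :
    zloopA len = ((15, 0) :: (zloopA (len - 16)).1, (zloopA (len - 16)).2) := by
  rw [zloopA, if_pos h]

theorem zloopA_lt (len : Int) (h : ¬ len ≥ 16) : zloopA len = ([], len) := by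
  rw [zloopA, if_neg h]

theorem loopB_flush (run : Int) (v : Int) (hv : v ≠ 0) (vs : List Int) :
    loopB run (v :: vs) = (zloopA run).1 ++ ((zloopA run).2, v) :: loopB 0 vs := by
  induction run using zloopA.induct with
  | case1 run h ih =>
    rw [loopB_cons, if_neg hv, if_pos h, ih, zloopA_ge run h]
    simp
  | case2 run h =>
    rw [loopB_cons, if_neg hv, if_neg h, zloopA_lt run h]
    simp

theorem loopB_run (n : Nat) (v : Int) (hv : v ≠ 0) (ys : List Int) :
    loopB 0 (List.replicate n v ++ ys) = List.replicate n (0, v) ++ loopB 0 ys := by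
  induction n with
  | zero => simp
  | succ m ih =>
    rw [List.replicate_succ, List.cons_append, loopB_cons, if_neg hv]
    rw [if_neg (by omega : ¬ (0:Int) ≥ 16), ih]
    simp [List.replicate_succ]

theorem trimA_cons (a : Int × Int) (g : List (Int × Int)) (h : a.2 ≠ 0 ∨ g ≠ []) :
    trimA (a :: g) = a :: trimA g := by
  cases g with
  | nil =>
    simp only [trimA]
    rcases h with h | h
    · simp [h]
    · exact absurd rfl h
  | cons b g' =>
    simp only [trimA, List.getLast?_cons_cons,
      List.dropLast_cons_of_ne_nil (List.cons_ne_nil b g')]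
    split <;> rfl

theorem takeWhile_beq_replicate (x : Int) (xs : List Int) :
    xs.takeWhile (· == x) = List.replicate (xs.takeWhile (· == x)).length x := by
  apply List.eq_replicate_length.mpr
  intro b hb
  have := List.mem_takeWhile_imp hb
  simpa using this

theorem head_dropWhile_ne (x : Int) (xs : List Int) (v : Int) (vs : List Int)
    (h : xs.dropWhile (· == x) = v :: vs) : v ≠ x := by
  have := List.head?_dropWhile_not (p := (· == x)) (l := xs)
  rw [h] at this
  simpa using this

-- decomposition of a block into its leading run and the rest
theorem block_decomp (x : Int) (xs : List Int) :
    x :: xs = List.replicate ((xs.takeWhile (· == x)).length + 1) x ++ xs.dropWhile (· == x) := by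
  rw [List.replicate_succ, List.cons_append]
  congr 1
  conv_lhs => rw [← List.takeWhile_append_dropWhile (p := (· == x)) (l := xs)]
  congr 1
  exact takeWhile_beq_replicate x xs

theorem loopA_helper (m : Nat) (v : Int) (hv : v ≠ 0) (T : List (Int × Int)) :
    loopA true (((m : Int) + 1, v) :: T) = List.replicate m (0, v) ++ loopA false T := by
  rw [loopA]
  by_cases hm0 : m = 0
  · subst hm0
    rw [if_pos (by norm_num)]
    simp
  · rw [if_neg (by omega : ¬ ((m : Int) + 1 - 1 = 0)), if_neg hv]
    have h2 : ((m : Int) + 1 - 1).toNat = m := by omega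
    rw [h2]

theorem main_equiv : ∀ (n : Nat) (block : List Int), block.length ≤ n →
    loopA false (trimA (pyGroups block)) = loopB 0 block := by
  intro n
  induction n with
  | zero =>
    intro block h
    have hb : block = [] := List.length_eq_zero_iff.mp (Nat.le_zero.mp h)
    subst hb
    rw [pyGroups_nil, loopB_nil]
    simp [trimA, loopA_nil]
  | succ N ih =>
    intro block hlen
    cases block with
    | nil =>
      rw [pyGroups_nil, loopB_nil]
      simp [trimA, loopA_nil]
    | cons x xs =>
      have hxslen : xs.length ≤ N := by simpa using hlen
      have hdecomp := block_decomp x xs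
      rw [pyGroups_cons]
      by_cases hx : x = 0
      · -- leading run of zeros
        subst hx
        rcases hys : xs.dropWhile (· == (0:Int)) with _ | ⟨v, vs⟩
        · -- block is all zeros: A deletes the trailing zero group, B never flushes
          rw [hys] at hdecomp
          rw [pyGroups_nil]
          have htrim : trimA [(((xs.takeWhile (· == (0:Int))).length : Int) + 1, 0)] = [] := by
            simp [trimA]
          rw [htrim, loopA_nil, hdecomp, loopB_zeros, loopB_nil]
        · have hv : v ≠ 0 := head_dropWhile_ne 0 xs v vs hys
          rw [hys] at hdecomp
          rw [pyGroups_cons]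
          have hvslen : vs.length ≤ N := by
            have h1 := List.length_dropWhile_le (p := (· == (0:Int))) (l := xs)
            rw [hys] at h1
            simp at h1; omega
          have hzslen : (vs.dropWhile (· == v)).length ≤ N := by
            have h2 := List.length_dropWhile_le (p := (· == v)) (l := vs)
            omega
          have hvs : vs = List.replicate (vs.takeWhile (· == v)).length v ++ vs.dropWhile (· == v) := by
            have h3 := block_decomp v vs
            rw [List.replicate_succ, List.cons_append] at h3
            exact (List.cons.injEq _ _ _ _).mp h3 |>.2
          -- trim passes through the two leading groups
          rw [trimA_cons _ _ (Or.inr (List.cons_ne_nil _ _))]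
          rw [trimA_cons (((vs.takeWhile (· == v)).length : Int) + 1, v) _
                (Or.inl (by simpa using hv))]
          -- A side: the zero run flushes as ZRLs plus (remainder, next key), then the v run
          rw [loopA]
          rw [if_neg (by omega : ¬ (((xs.takeWhile (· == (0:Int))).length : Int) + 1 = 0))]
          rw [if_pos rfl]
          rw [loopA_helper _ v hv, ih _ hzslen]
          -- B side
          rw [hdecomp, loopB_zeros]
          have hcast : (0:Int) + (((xs.takeWhile (· == (0:Int))).length + 1 : Nat) : Int)
              = ((xs.takeWhile (· == (0:Int))).length : Int) + 1 := by push_cast; ring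
          rw [hcast, loopB_flush _ v hv]
          conv_rhs => rw [hvs]
          rw [loopB_run _ v hv]
          simp [List.headD]
      · -- leading run of nonzeros
        rw [trimA_cons _ _ (Or.inl (by simpa using hx))]
        rw [loopA]
        rw [if_neg (by omega : ¬ (((xs.takeWhile (· == x)).length : Int) + 1 = 0))]
        rw [if_neg hx]
        have hyslen : (xs.dropWhile (· == x)).length ≤ N := by
          have := List.length_dropWhile_le (p := (· == x)) (l := xs)
          omega
        rw [ih _ hyslen, hdecomp, loopB_run _ x hx _]
        have hnat : (((xs.takeWhile (· == x)).length : Int) + 1).toNat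
            = (xs.takeWhile (· == x)).length + 1 := by omega
        rw [hnat]

-- ===== VERDICT (by name: the statement is the Claim_ definition above) =====
theorem AC_RunLength_enc_spec : Claim_equal_AC_RunLength_enc := by
  intro block _ _
  unfold Spec_AC_RunLength_enc AC_RunLength_enc AC_RunLength_enc_alt
  rw [main_equiv block.length block le_rfl]

theorem AC_RunLength_enc_raises : Claim_raises_AC_RunLength_enc := by
  unfold Claim_raises_AC_RunLength_enc
  refine ⟨fun block _ h => ?_, by decide, by decide, ?_⟩
  · unfold Raises_AC_RunLength_enc at h
    unfold Pre_AC_RunLength_enc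
    simp [h]
  · show AC_RunLength_enc_alt [] = [(0, 0)]
    rw [AC_RunLength_enc_alt, loopB_nil, List.nil_append]

-- self-check: the crash witness really lies in the raises region
theorem pvRaiseWitness_ok : Raises_AC_RunLength_enc pvRaiseWitness_AC_RunLength_enc :=
  AC_RunLength_enc_raises.2.2.1
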